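-- pv_equiv track=rewrite | github.com/OGCryptoKitty/hydra-arm3 | src/services/prediction_markets.py | _tag_event_for_prediction_markets
-- ===== SOURCE A (Python) =====
-- def _tag_event_for_prediction_markets(title: str, summary: str, agency: str) -> list[str]:
--     """Tag a regulatory event with relevant prediction market categories."""
--     text = (title + " " + summary).lower()
--     tags = []
--
--     if agency == "SEC":
--         tags.append("polymarket:regulation")
--         if any(w in text for w in ["crypto", "bitcoin", "ethereum", "digital asset"]):
--             tags.append("polymarket:crypto")
--             tags.append("kalshi:KXCRYPTO")
--         if any(w in text for w in ["etf", "exchange-traded"]):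
--             tags.append("polymarket:etf-approval")
--         if any(w in text for w in ["enforcement", "charge", "settle", "order"]):
--             tags.append("polymarket:sec-enforcement")
--
--     elif agency == "CFTC":
--         tags.append("polymarket:regulation")
--         tags.append("kalshi:KXCFTC")
--         if any(w in text for w in ["prediction market", "event contract", "election"]):
--             tags.append("polymarket:prediction-markets-regulation")
--
--     elif agency in ("Fed", "Federal Reserve"):
--         tags.append("polymarket:fed-rate")
--         tags.append("kalshi:KXFED")
--
--     elif agency == "FinCEN":
--         tags.append("polymarket:regulation")
--         if any(w in text for w in ["crypto", "virtual currency", "stablecoin"]):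
--             tags.append("polymarket:crypto")
--
--     return tags
-- ===== SOURCE B (Python) =====
-- # Table-driven re-implementation: agency -> ordered rules; a rule is
-- # (optional keyword list, tags) and unconditional rules have keywords None.
-- _PM_RULES = {
--     "SEC": [
--         (None, ["polymarket:regulation"]),
--         (["crypto", "bitcoin", "ethereum", "digital asset"],
--          ["polymarket:crypto", "kalshi:KXCRYPTO"]),
--         (["etf", "exchange-traded"], ["polymarket:etf-approval"]),
--         (["enforcement", "charge", "settle", "order"],
--          ["polymarket:sec-enforcement"]),
--     ],
--     "CFTC": [
--         (None, ["polymarket:regulation", "kalshi:KXCFTC"]),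
--         (["prediction market", "event contract", "election"],
--          ["polymarket:prediction-markets-regulation"]),
--     ],
--     "Fed": [(None, ["polymarket:fed-rate", "kalshi:KXFED"])],
--     "Federal Reserve": [(None, ["polymarket:fed-rate", "kalshi:KXFED"])],
--     "FinCEN": [
--         (None, ["polymarket:regulation"]),
--         (["crypto", "virtual currency", "stablecoin"], ["polymarket:crypto"]),
--     ],
-- }
--
--
-- def _tag_event_for_prediction_markets(title: str, summary: str, agency: str) -> list[str]:
--     text = (title + " " + summary).lower()
--     return [tag
--             for kws, tags in _PM_RULES.get(agency, [])
--             if kws is None or any(k in text for k in kws)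
--             for tag in tags]
-- ===== Notes on version B (the rewrite author's own statement) =====
-- stated objective: idiomatic
-- what changed: Replaced the per-agency if/elif cascade of appends with a declarative agency-to-rules table (unconditional or keyword-conditional tag lists) consumed by a single generic pass.
import Mathlib
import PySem

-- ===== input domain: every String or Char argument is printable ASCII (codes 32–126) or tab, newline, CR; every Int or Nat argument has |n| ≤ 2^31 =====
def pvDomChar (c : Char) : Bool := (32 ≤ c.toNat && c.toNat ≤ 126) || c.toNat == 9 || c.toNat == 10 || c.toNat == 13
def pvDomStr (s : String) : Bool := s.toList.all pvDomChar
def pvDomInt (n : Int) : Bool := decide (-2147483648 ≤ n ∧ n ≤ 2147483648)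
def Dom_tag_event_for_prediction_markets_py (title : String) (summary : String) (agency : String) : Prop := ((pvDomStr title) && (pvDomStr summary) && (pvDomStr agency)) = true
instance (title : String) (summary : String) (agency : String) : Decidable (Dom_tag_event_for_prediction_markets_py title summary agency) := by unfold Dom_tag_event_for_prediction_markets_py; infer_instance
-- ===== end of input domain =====

-- B replaces A's if/elif cascade by a declarative agency → rules table folded in one pass (objective: idiomatic, same cost).

-- ===== PORT A =====
def tag_event_for_prediction_markets_py (title : String) (summary : String) (agency : String) : List String :=
  let text := PySem.Str.lower (title ++ " " ++ summary)
  if agency == "SEC" then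
    let tags := ["polymarket:regulation"]
    let tags := if (["crypto", "bitcoin", "ethereum", "digital asset"]).any (fun w => PySem.Str.isIn w text)
      then tags ++ ["polymarket:crypto", "kalshi:KXCRYPTO"] else tags
    let tags := if (["etf", "exchange-traded"]).any (fun w => PySem.Str.isIn w text)
      then tags ++ ["polymarket:etf-approval"] else tags
    let tags := if (["enforcement", "charge", "settle", "order"]).any (fun w => PySem.Str.isIn w text)
      then tags ++ ["polymarket:sec-enforcement"] else tags
    tags
  else if agency == "CFTC" then
    let tags := ["polymarket:regulation", "kalshi:KXCFTC"]
    let tags := if (["prediction market", "event contract", "election"]).any (fun w => PySem.Str.isIn w text)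
      then tags ++ ["polymarket:prediction-markets-regulation"] else tags
    tags
  else if agency == "Fed" || agency == "Federal Reserve" then
    ["polymarket:fed-rate", "kalshi:KXFED"]
  else if agency == "FinCEN" then
    let tags := ["polymarket:regulation"]
    let tags := if (["crypto", "virtual currency", "stablecoin"]).any (fun w => PySem.Str.isIn w text)
      then tags ++ ["polymarket:crypto"] else tags
    tags
  else []

-- ===== PORT B =====
-- the rule table of Source B: agency → ordered list of (optional keyword list, tags)
def pvPMRules : PySem.Dict String (List (Option (List String) × List String)) :=
  PySem.Dict.ofList
    [ ("SEC",
        [ (none, ["polymarket:regulation"]),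
          (some ["crypto", "bitcoin", "ethereum", "digital asset"],
            ["polymarket:crypto", "kalshi:KXCRYPTO"]),
          (some ["etf", "exchange-traded"], ["polymarket:etf-approval"]),
          (some ["enforcement", "charge", "settle", "order"],
            ["polymarket:sec-enforcement"]) ]),
      ("CFTC",
        [ (none, ["polymarket:regulation", "kalshi:KXCFTC"]),
          (some ["prediction market", "event contract", "election"],
            ["polymarket:prediction-markets-regulation"]) ]),
      ("Fed", [ (none, ["polymarket:fed-rate", "kalshi:KXFED"]) ]),
      ("Federal Reserve", [ (none, ["polymarket:fed-rate", "kalshi:KXFED"]) ]),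
      ("FinCEN",
        [ (none, ["polymarket:regulation"]),
          (some ["crypto", "virtual currency", "stablecoin"], ["polymarket:crypto"]) ]) ]

def tag_event_for_prediction_markets_py_alt (title : String) (summary : String) (agency : String) : List String :=
  let text := PySem.Str.lower (title ++ " " ++ summary)
  (pvPMRules.getD agency []).flatMap (fun r =>
    if (match r.1 with
        | none => true
        | some kws => kws.any (fun k => PySem.Str.isIn k text)) then r.2 else [])

-- ===== PRECONDITION & SPEC =====
def Spec_tag_event_for_prediction_markets_py (title : String) (summary : String) (agency : String) (out : List String) : Prop := out = tag_event_for_prediction_markets_py_alt title summary agency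
instance (title : String) (summary : String) (agency : String) (out : List String) : Decidable (Spec_tag_event_for_prediction_markets_py title summary agency out) := by unfold Spec_tag_event_for_prediction_markets_py; infer_instance

-- ===== CLAIM (what is proved, stated in full; the proofs are below) =====
def Claim_equal_tag_event_for_prediction_markets_py : Prop := ∀ (title : String) (summary : String) (agency : String), Dom_tag_event_for_prediction_markets_py title summary agency → Spec_tag_event_for_prediction_markets_py title summary agency (tag_event_for_prediction_markets_py title summary agency)

-- ===== LEMMAS AND PROOFS =====

-- ===== VERDICT (by name: the statement is the Claim_ definition above) =====
theorem tag_event_for_prediction_markets_py_spec : Claim_equal_tag_event_for_prediction_markets_py := by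
  intro title summary agency _
  unfold Spec_tag_event_for_prediction_markets_py
  unfold tag_event_for_prediction_markets_py tag_event_for_prediction_markets_py_alt
  rcases eq_or_ne agency "SEC" with h | h
  · subst h
    rw [show pvPMRules.getD "SEC" [] =
        [ ((none : Option (List String)), ["polymarket:regulation"]),
          (some ["crypto", "bitcoin", "ethereum", "digital asset"],
            ["polymarket:crypto", "kalshi:KXCRYPTO"]),
          (some ["etf", "exchange-traded"], ["polymarket:etf-approval"]),
          (some ["enforcement", "charge", "settle", "order"],
            ["polymarket:sec-enforcement"]) ] from by decide]
    simp only [List.flatMap_cons, List.flatMap_nil, beq_self_eq_true, if_true]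
    split_ifs <;> simp_all
  rcases eq_or_ne agency "CFTC" with h2 | h2
  · subst h2
    rw [show pvPMRules.getD "CFTC" [] =
        [ ((none : Option (List String)), ["polymarket:regulation", "kalshi:KXCFTC"]),
          (some ["prediction market", "event contract", "election"],
            ["polymarket:prediction-markets-regulation"]) ] from by decide]
    simp only [List.flatMap_cons, List.flatMap_nil]
    split_ifs <;> simp_all
  rcases eq_or_ne agency "Fed" with h3 | h3
  · subst h3
    rw [show pvPMRules.getD "Fed" [] =
        [ ((none : Option (List String)), ["polymarket:fed-rate", "kalshi:KXFED"]) ] from by decide]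
    simp
  rcases eq_or_ne agency "Federal Reserve" with h4 | h4
  · subst h4
    rw [show pvPMRules.getD "Federal Reserve" [] =
        [ ((none : Option (List String)), ["polymarket:fed-rate", "kalshi:KXFED"]) ] from by decide]
    simp
  rcases eq_or_ne agency "FinCEN" with h5 | h5
  · subst h5
    rw [show pvPMRules.getD "FinCEN" [] =
        [ ((none : Option (List String)), ["polymarket:regulation"]),
          (some ["crypto", "virtual currency", "stablecoin"], ["polymarket:crypto"]) ] from by decide]
    simp only [List.flatMap_cons, List.flatMap_nil]
    split_ifs <;> simp_all
  have f1 : ("SEC" == agency) = false := beq_eq_false_iff_ne.mpr (Ne.symm h)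
  have f2 : ("CFTC" == agency) = false := beq_eq_false_iff_ne.mpr (Ne.symm h2)
  have f3 : ("Fed" == agency) = false := beq_eq_false_iff_ne.mpr (Ne.symm h3)
  have f4 : ("Federal Reserve" == agency) = false := beq_eq_false_iff_ne.mpr (Ne.symm h4)
  have f5 : ("FinCEN" == agency) = false := beq_eq_false_iff_ne.mpr (Ne.symm h5)
  have hg : pvPMRules.getD agency [] = [] := by
    unfold pvPMRules
    simp [PySem.Dict.getD_eq_get?_getD, PySem.Dict.get?, PySem.Dict.ofList, PySem.Dict.update,
      PySem.Dict.empty, PySem.Dict.insert, List.find?, f1, f2, f3, f4, f5]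
  rw [hg]
  simp [h, h2, h3, h4, h5]
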